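-- pv_equiv track=rewrite | github.com/DenisKrivoruchko11/LeetCode | solutions/binary/medium/371_sum_of_two_integers.py | get_sum
-- ===== SOURCE A (Python) =====
-- def get_sum(a: int, b: int) -> int:
--     result = prev = 0
--     for i in range(12):
--         count = len([x for x in [a, b, prev] if x & 2 ** i == 2 ** i])
--         if count % 2 == 1:
--             result |= 2 ** i
--         prev = 2 ** (i + 1) if count > 1 else 0
--     return result | ~(2 ** 12 - 1) if result & 2 ** 11 == 2 ** 11 else result
-- ===== SOURCE B (Python) =====
-- def get_sum(a: int, b: int) -> int:
--     s = (a + b) % 4096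
--     return s - 4096 if s >= 2048 else s
-- ===== Notes on version B (the rewrite author's own statement) =====
-- stated objective: simpler
-- what changed: Replaces the 12-iteration bit-by-bit full-adder loop (per-bit filter/count/carry) by a closed form: add, reduce modulo 4096, and sign-extend values >= 2048 by subtracting 4096.
import Mathlib
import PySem

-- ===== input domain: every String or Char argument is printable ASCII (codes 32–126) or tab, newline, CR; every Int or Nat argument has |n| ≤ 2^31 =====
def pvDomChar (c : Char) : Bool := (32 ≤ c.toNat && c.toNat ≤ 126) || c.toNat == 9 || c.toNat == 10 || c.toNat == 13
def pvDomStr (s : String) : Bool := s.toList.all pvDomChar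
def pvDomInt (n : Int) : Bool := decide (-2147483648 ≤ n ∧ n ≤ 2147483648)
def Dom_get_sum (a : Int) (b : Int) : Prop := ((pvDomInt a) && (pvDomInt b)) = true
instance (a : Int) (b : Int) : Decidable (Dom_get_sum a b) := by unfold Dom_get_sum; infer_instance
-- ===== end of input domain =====

-- B replaces A's 12-iteration bitwise full-adder loop by the closed form ((a+b) mod 4096) with sign extension; objective: simpler.

-- ===== PORT A =====
-- loop body of A (Python's &, | on int are Int.land, Int.lor; both exact two's-complement semantics)
def pvAStep (a b : Int) (st : Int × Int) (i : Nat) : Int × Int :=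
  let count := ([a, b, st.2].filter (fun x => Int.land x ((2:Int)^i) == (2:Int)^i)).length
  (if count % 2 == 1 then Int.lor st.1 ((2:Int)^i) else st.1,
   if count > 1 then (2:Int)^(i+1) else 0)

def get_sum (a : Int) (b : Int) : Int :=
  let st := (List.range 12).foldl (pvAStep a b) (0, 0)
  if Int.land st.1 ((2:Int)^11) == (2:Int)^11 then Int.lor st.1 (~~~((2:Int)^12 - 1)) else st.1

-- ===== PORT B =====
def get_sum_alt (a : Int) (b : Int) : Int :=
  let s := PySem.Int.mod (a + b) 4096
  if 2048 ≤ s then s - 4096 else s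

-- ===== PRECONDITION & SPEC =====
def Spec_get_sum (a : Int) (b : Int) (out : Int) : Prop := out = get_sum_alt a b
instance (a : Int) (b : Int) (out : Int) : Decidable (Spec_get_sum a b out) := by unfold Spec_get_sum; infer_instance

-- ===== CLAIM (what is proved, stated in full; the proofs are below) =====
def Claim_equal_get_sum : Prop := ∀ (a : Int) (b : Int), Dom_get_sum a b → Spec_get_sum a b (get_sum a b)

-- ===== LEMMAS AND PROOFS =====

-- x &&& 2^n extracts bit n, arithmetically
theorem pvLand (x : Int) (n : Nat) :
    Int.land x ((2:Int)^n) = (x / (2:Int)^n % 2) * (2:Int)^n := by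
  have hp : ((2:Int)^n) = ((2^n : Nat) : Int) := by push_cast; ring
  have hpos : (0:Nat) < 2^n := Nat.two_pow_pos n
  cases x with
  | ofNat m =>
    rw [hp, Int.ofNat_eq_natCast]
    show ((Nat.land m (2^n) : Nat) : Int) = _
    rw [show Nat.land m (2^n) = m &&& 2^n from rfl, Nat.and_two_pow,
      Int.ofNat_ediv_ofNat, Nat.testBit_eq_decide_div_mod_eq]
    generalize (m / 2^n) = q
    generalize (2^n : Nat) = k at *
    rcases Nat.mod_two_eq_zero_or_one q with h | h
    · have h2 : ((q:Int) % 2) = 0 := by omega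
      simp [h, h2]
    · have h2 : ((q:Int) % 2) = 1 := by omega
      simp [h, h2]
  | negSucc m =>
    rw [hp]
    show ((Nat.ldiff (2^n) m : Nat) : Int) = _
    have hld : Nat.ldiff (2^n) m = if m.testBit n then 0 else 2^n := by
      apply Nat.eq_of_testBit_eq
      intro j
      rw [Nat.testBit_ldiff]
      by_cases hj : n = j
      · subst hj; cases h : m.testBit n <;> simp [h]
      · cases h : m.testBit n <;> simp [hj]
    have hdiv : (Int.negSucc m) / ((2^n : Nat) : Int) = -(((m / 2^n : Nat) : Int) + 1) := by
      rw [Int.negSucc_ediv _ (by exact_mod_cast hpos)]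
      rw [show ((m : Int).ediv ((2^n : Nat) : Int)) = (m : Int) / ((2^n : Nat) : Int) from rfl,
        Int.ofNat_ediv_ofNat]
    have hbit : m.testBit n = decide (m / 2^n % 2 = 1) := Nat.testBit_eq_decide_div_mod_eq
    rw [hld, hdiv]
    cases ht : m.testBit n
    · rw [ht] at hbit
      have h : m / 2^n % 2 = 0 := by
        have := of_decide_eq_false hbit.symm; omega
      generalize (m / 2^n) = q at *
      generalize (2^n : Nat) = k at *
      have h2 : ((-1 + -(q:Int)) % 2) = 1 := by omega
      simp [h2]
    · rw [ht] at hbit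
      have h : m / 2^n % 2 = 1 := of_decide_eq_true hbit.symm
      generalize (m / 2^n) = q at *
      generalize (2^n : Nat) = k at *
      have h2 : ((-1 + -(q:Int)) % 2) = 0 := by omega
      simp [h2]

-- peeling the next binary digit of an emod
theorem pvEmodSucc (x : Int) (n : Nat) :
    x % ((2:Int)^(n+1)) = x % (2:Int)^n + (x / (2:Int)^n % 2) * (2:Int)^n := by
  have hP : (0:Int) < 2^n := by positivity
  rw [pow_succ]
  set P := ((2:Int)^n) with hPdef
  set r := x % P with hr
  set q := x / P with hq
  have h1 : 0 ≤ r := Int.emod_nonneg x hP.ne'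
  have h2 : r < P := Int.emod_lt_of_pos x hP
  have h3 : r + P * q = x := Int.emod_add_mul_ediv x P
  have h5 : q % 2 + 2 * (q / 2) = q := Int.emod_add_mul_ediv q 2
  have hx : x = (r + q % 2 * P) + (P * 2) * (q / 2) := by linear_combination -h3 - P * h5
  rw [hx, Int.add_mul_emod_self_left]
  apply Int.emod_eq_of_lt
  · rcases Int.emod_two_eq q with h | h <;> rw [h] <;> nlinarith
  · rcases Int.emod_two_eq q with h | h <;> rw [h] <;> nlinarith

-- ||| with a fresh power of two is addition
theorem pvLor (m n : Nat) (h : m < 2^n) :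
    Int.lor (↑m : Int) ((2:Int)^n) = ↑m + (2:Int)^n := by
  have hp : ((2:Int)^n) = ((2^n : Nat) : Int) := by push_cast; ring
  rw [hp]
  show ((Nat.lor m (2^n) : Nat) : Int) = _
  have h2 : 2^n + m = 2^n ||| m := by simpa using Nat.two_pow_add_eq_or_of_lt h 1
  rw [show Nat.lor m (2^n) = m ||| 2^n from rfl, Nat.lor_comm, ← h2]
  push_cast; ring

theorem pvLorInt (S : Int) (n : Nat) (h0 : 0 ≤ S) (h1 : S < 2^n) :
    Int.lor S ((2:Int)^n) = S + 2^n := by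
  obtain ⟨m, rfl⟩ := Int.eq_ofNat_of_zero_le h0
  have hcast : ((2^n : Nat) : Int) = (2:Int)^n := by push_cast; ring
  have hm : (m : Int) < ((2^n : Nat) : Int) := by rw [hcast]; exact h1
  exact pvLor m n (by exact_mod_cast hm)

-- ldiff against an all-ones mask is subtraction
theorem pvLdiffPow : ∀ (k m : Nat), Nat.ldiff (2^k - 1) m = 2^k - 1 - m % 2^k := by
  intro k
  induction k with
  | zero =>
    intro m
    apply Nat.eq_of_testBit_eq
    intro j
    simp [Nat.testBit_ldiff]
  | succ k ih =>
    intro m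
    have hP : (0:Nat) < 2^k := Nat.two_pow_pos k
    have hbit : Nat.bit true (2^k - 1) = 2^(k+1) - 1 := by
      rw [Nat.bit_val, pow_succ]; simp; omega
    conv_lhs => rw [← hbit, ← Nat.bit_bodd_div2 m]
    rw [Nat.ldiff_bit, ih, Nat.bit_val, Nat.div2_val]
    have hv : m / 2 % 2^k < 2^k := Nat.mod_lt _ hP
    have hu : m / 2 = 2^k * (m/2/2^k) + m/2 % 2^k := (Nat.div_add_mod _ _).symm
    have hs : m = (2*(m/2 % 2^k) + m % 2) + 2^(k+1) * (m/2/2^k) := by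
      have h1 : 2^(k+1)*(m/2/2^k) = 2*(2^k*(m/2/2^k)) := by rw [pow_succ]; ring
      omega
    have hmod : m % 2^(k+1) = 2*(m/2 % 2^k) + m % 2 := by
      conv_lhs => rw [hs]
      rw [Nat.add_mul_mod_self_left]
      apply Nat.mod_eq_of_lt
      rw [pow_succ]; omega
    rw [hmod]
    have hb := Nat.mod_two_of_bodd m
    cases h : Nat.bodd m <;> simp [h] at hb ⊢ <;> rw [pow_succ] <;> omega

-- ||| with the two's-complement mask ~4095 subtracts 4096 from a 12-bit value
theorem pvLorNeg (S : Int) (h0 : 0 ≤ S) (h : S < 4096) :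
    Int.lor S (~~~(4095:Int)) = S - 4096 := by
  obtain ⟨m, rfl⟩ := Int.eq_ofNat_of_zero_le h0
  have hm : m < 4096 := by exact_mod_cast h
  have h1 : (~~~(4095:Int)) = Int.negSucc 4095 := by decide
  rw [h1]
  show Int.negSucc (Nat.ldiff 4095 m) = _
  have h2 : Nat.ldiff 4095 m = 4095 - m := by
    have := pvLdiffPow 12 m
    norm_num at this
    rw [this, Nat.mod_eq_of_lt hm]
  rw [h2, Int.negSucc_eq]
  push_cast [Nat.cast_sub (by omega : m ≤ 4095)]
  ring

-- one full-adder step preserves the invariant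
theorem pvStepInv (a b : Int) (n : Nat) :
    pvAStep a b ((a+b) % (2:Int)^n,
      if (2:Int)^n ≤ a % (2:Int)^n + b % (2:Int)^n then (2:Int)^n else 0) n
    = ((a+b) % (2:Int)^(n+1),
      if (2:Int)^(n+1) ≤ a % (2:Int)^(n+1) + b % (2:Int)^(n+1) then (2:Int)^(n+1) else 0) := by
  have hP : (0:Int) < 2^n := by positivity
  have hSn : 0 ≤ (a+b) % (2:Int)^n := Int.emod_nonneg _ hP.ne'
  have hSl : (a+b) % (2:Int)^n < 2^n := Int.emod_lt_of_pos _ hP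
  have hA0 : 0 ≤ a % (2:Int)^n := Int.emod_nonneg _ hP.ne'
  have hAl : a % (2:Int)^n < 2^n := Int.emod_lt_of_pos _ hP
  have hB0 : 0 ≤ b % (2:Int)^n := Int.emod_nonneg _ hP.ne'
  have hBl : b % (2:Int)^n < 2^n := Int.emod_lt_of_pos _ hP
  have hAd : a % (2:Int)^n + (2:Int)^n * (a / 2^n) = a := Int.emod_add_mul_ediv a _
  have hBd : b % (2:Int)^n + (2:Int)^n * (b / 2^n) = b := Int.emod_add_mul_ediv b _
  have hSum : (a+b) / (2:Int)^n
      = a / 2^n + b / 2^n + (if (2:Int)^n ≤ a % (2:Int)^n + b % (2:Int)^n then 1 else 0) := by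
    by_cases hg : (2:Int)^n ≤ a % (2:Int)^n + b % (2:Int)^n
    · rw [if_pos hg]
      exact ((Int.ediv_emod_unique (a := a + b) (b := (2:Int)^n)
          (r := a % 2^n + b % 2^n - 2^n) (q := a / 2^n + b / 2^n + 1) hP).mpr
        ⟨by linear_combination hAd + hBd, by omega, by omega⟩).1
    · rw [if_neg hg]
      exact ((Int.ediv_emod_unique (a := a + b) (b := (2:Int)^n)
          (r := a % 2^n + b % 2^n) (q := a / 2^n + b / 2^n + 0) hP).mpr
        ⟨by linear_combination hAd + hBd, by omega, by omega⟩).1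
  rw [pvAStep]
  rw [pvEmodSucc (a+b) n, pvEmodSucc a n, pvEmodSucc b n]
  have hPP : ((2:Int)^n) / 2^n = 1 := Int.ediv_self hP.ne'
  have ht0 : (((0:Int)) * 2^n == 2^n) = false := by rw [zero_mul, beq_eq_false_iff_ne]; omega
  have ht1 : (((1:Int) % 2) * 2^n == 2^n) = true := by norm_num
  have ht0b : (((0:Int) % 2) * 2^n == 2^n) = false := by
    rw [show ((0:Int) % 2) = 0 by norm_num, zero_mul, beq_eq_false_iff_ne]; omega
  have ht1b : (((1:Int)) * 2^n == 2^n) = true := by norm_num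
  have h2P : ((2:Int)^(n+1)) = 2^n + 2^n := by ring
  by_cases hg : (2:Int)^n ≤ a % (2:Int)^n + b % (2:Int)^n
  · rcases Int.emod_two_eq (a / (2:Int)^n) with hα | hα <;>
      rcases Int.emod_two_eq (b / (2:Int)^n) with hβ | hβ
    · have hδ : (a+b) / (2:Int)^n % 2 = 1 := by rw [hSum, if_pos hg]; omega
      simp only [if_pos hg, List.filter, pvLand, hα, hβ, hδ, hPP, Int.zero_ediv, ht0, ht0b, ht1, ht1b]
      norm_num [Prod.ext_iff]
      all_goals try rw [pvLorInt _ n hSn hSl]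
      all_goals try constructor
      all_goals try simp only [h2P]
      all_goals first | omega | (split_ifs <;> omega)
    · have hδ : (a+b) / (2:Int)^n % 2 = 0 := by rw [hSum, if_pos hg]; omega
      simp only [if_pos hg, List.filter, pvLand, hα, hβ, hδ, hPP, Int.zero_ediv, ht0, ht0b, ht1, ht1b]
      norm_num [Prod.ext_iff]
      all_goals try rw [pvLorInt _ n hSn hSl]
      all_goals try constructor
      all_goals try simp only [h2P]
      all_goals first | omega | (split_ifs <;> omega)
    · have hδ : (a+b) / (2:Int)^n % 2 = 0 := by rw [hSum, if_pos hg]; omega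
      simp only [if_pos hg, List.filter, pvLand, hα, hβ, hδ, hPP, Int.zero_ediv, ht0, ht0b, ht1, ht1b]
      norm_num [Prod.ext_iff]
      all_goals try rw [pvLorInt _ n hSn hSl]
      all_goals try constructor
      all_goals try simp only [h2P]
      all_goals first | omega | (split_ifs <;> omega)
    · have hδ : (a+b) / (2:Int)^n % 2 = 1 := by rw [hSum, if_pos hg]; omega
      simp only [if_pos hg, List.filter, pvLand, hα, hβ, hδ, hPP, Int.zero_ediv, ht0, ht0b, ht1, ht1b]
      norm_num [Prod.ext_iff]
      all_goals try rw [pvLorInt _ n hSn hSl]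
      all_goals try constructor
      all_goals try simp only [h2P]
      all_goals first | omega | (split_ifs <;> omega)
  · rcases Int.emod_two_eq (a / (2:Int)^n) with hα | hα <;>
      rcases Int.emod_two_eq (b / (2:Int)^n) with hβ | hβ
    · have hδ : (a+b) / (2:Int)^n % 2 = 0 := by rw [hSum, if_neg hg]; omega
      simp only [if_neg hg, List.filter, pvLand, hα, hβ, hδ, hPP, Int.zero_ediv, ht0, ht0b, ht1, ht1b]
      norm_num [Prod.ext_iff]
      all_goals try rw [pvLorInt _ n hSn hSl]
      all_goals try constructor
      all_goals try simp only [h2P]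
      all_goals first | omega | (split_ifs <;> omega)
    · have hδ : (a+b) / (2:Int)^n % 2 = 1 := by rw [hSum, if_neg hg]; omega
      simp only [if_neg hg, List.filter, pvLand, hα, hβ, hδ, hPP, Int.zero_ediv, ht0, ht0b, ht1, ht1b]
      norm_num [Prod.ext_iff]
      all_goals try rw [pvLorInt _ n hSn hSl]
      all_goals try constructor
      all_goals try simp only [h2P]
      all_goals first | omega | (split_ifs <;> omega)
    · have hδ : (a+b) / (2:Int)^n % 2 = 1 := by rw [hSum, if_neg hg]; omega
      simp only [if_neg hg, List.filter, pvLand, hα, hβ, hδ, hPP, Int.zero_ediv, ht0, ht0b, ht1, ht1b]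
      norm_num [Prod.ext_iff]
      all_goals try rw [pvLorInt _ n hSn hSl]
      all_goals try constructor
      all_goals try simp only [h2P]
      all_goals first | omega | (split_ifs <;> omega)
    · have hδ : (a+b) / (2:Int)^n % 2 = 0 := by rw [hSum, if_neg hg]; omega
      simp only [if_neg hg, List.filter, pvLand, hα, hβ, hδ, hPP, Int.zero_ediv, ht0, ht0b, ht1, ht1b]
      norm_num [Prod.ext_iff]
      all_goals try rw [pvLorInt _ n hSn hSl]
      all_goals try constructor
      all_goals try simp only [h2P]
      all_goals first | omega | (split_ifs <;> omega)

theorem pvInv (a b : Int) (n : Nat) :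
    (List.range n).foldl (pvAStep a b) (0, 0)
    = ((a+b) % (2:Int)^n,
      if (2:Int)^n ≤ a % (2:Int)^n + b % (2:Int)^n then (2:Int)^n else 0) := by
  induction n with
  | zero => simp
  | succ n ih => rw [List.range_succ, List.foldl_append, ih, List.foldl_cons, List.foldl_nil,
      pvStepInv]

-- ===== VERDICT (by name: the statement is the Claim_ definition above) =====
theorem get_sum_spec : Claim_equal_get_sum := by
  intro a b _
  unfold Spec_get_sum get_sum get_sum_alt
  simp only [pvInv]
  have hmod : PySem.Int.mod (a + b) 4096 = (a+b) % 4096 :=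
    PySem.Int.mod_eq_emod_of_pos (by norm_num)
  have h4096 : ((2:Int)^12) = 4096 := by norm_num
  have h2048 : ((2:Int)^11) = 2048 := by norm_num
  have h4095 : ((4096:Int) - 1) = 4095 := by norm_num
  simp only [hmod, h4096, h2048, h4095]
  have hS0 : 0 ≤ (a+b) % (4096:Int) := Int.emod_nonneg _ (by norm_num)
  have hSl : (a+b) % (4096:Int) < 4096 := Int.emod_lt_of_pos _ (by norm_num)
  set S := (a+b) % (4096:Int) with hS
  have hland : Int.land S (2048:Int) = (S / 2048 % 2) * 2048 := by
    have := pvLand S 11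
    norm_num at this ⊢
    exact this
  by_cases hbig : (2048:Int) ≤ S
  · have hcond : (Int.land S (2048:Int) == (2048:Int)) = true := by
      rw [hland]
      have : S / 2048 % 2 = 1 := by omega
      norm_num [this]
    rw [if_pos hcond, if_pos hbig, pvLorNeg S hS0 hSl]
  · have hcond : (Int.land S (2048:Int) == (2048:Int)) = false := by
      rw [hland]
      have : S / 2048 % 2 = 0 := by omega
      norm_num [this]
    rw [if_neg (by simp at hcond ⊢; exact hcond), if_neg hbig]
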